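-- pv_equiv track=rewrite | github.com/rasmus-antsi/Aasta-Tegija-2026 | utils/scraper.py | identify_ceo
-- ===== SOURCE A (Python) =====
-- from typing import Optional
--
-- def identify_ceo(persons: list[dict]) -> Optional[str]:
--     """
--     Identify the CEO from a list of persons.
--     """
--     # Priority order for CEO-like roles
--     ceo_roles = ["JUHL", "JUHATUSE LIIGE", "JUHATUSE ESIMEES", "JUHATAJA", "DIREKTOR", "PROKURIST"]
--
--     for role_code in ceo_roles:
--         for person in persons:
--             role = f"{person.get('role', '')} {person.get('role_text', '')}".upper()
--             if role_code in role and person.get("name"):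
--                 return person.get("name")
--
--     # Fallback: return first person with a name
--     for person in persons:
--         if person.get("name"):
--             return person.get("name")
--
--     return None
-- ===== SOURCE B (Python) =====
-- from typing import Optional
--
-- def identify_ceo(persons: list[dict]) -> Optional[str]:
--     """Single pass: track the best (lowest) role-priority named person seen so far."""
--     ceo_roles = ["JUHL", "JUHATUSE LIIGE", "JUHATUSE ESIMEES", "JUHATAJA", "DIREKTOR", "PROKURIST"]
--     best_priority = len(ceo_roles) + 1
--     best_name = None
--     for person in persons:
--         name = person.get("name")
--         if not name:
--             continue
--         role = f"{person.get('role', '')} {person.get('role_text', '')}".upper()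
--         priority = next((i for i, rc in enumerate(ceo_roles) if rc in role), len(ceo_roles))
--         if priority < best_priority:
--             best_priority = priority
--             best_name = name
--     return best_name
-- ===== Notes on version B (the rewrite author's own statement) =====
-- stated objective: simpler
-- what changed: Replaces A's role-major nested scans (one pass over all persons per role code, plus a separate fallback pass) by a single pass over persons that computes each named person's role priority once and keeps the strictly-best one, with len(ceo_roles) as the fallback priority.
import Mathlib
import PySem

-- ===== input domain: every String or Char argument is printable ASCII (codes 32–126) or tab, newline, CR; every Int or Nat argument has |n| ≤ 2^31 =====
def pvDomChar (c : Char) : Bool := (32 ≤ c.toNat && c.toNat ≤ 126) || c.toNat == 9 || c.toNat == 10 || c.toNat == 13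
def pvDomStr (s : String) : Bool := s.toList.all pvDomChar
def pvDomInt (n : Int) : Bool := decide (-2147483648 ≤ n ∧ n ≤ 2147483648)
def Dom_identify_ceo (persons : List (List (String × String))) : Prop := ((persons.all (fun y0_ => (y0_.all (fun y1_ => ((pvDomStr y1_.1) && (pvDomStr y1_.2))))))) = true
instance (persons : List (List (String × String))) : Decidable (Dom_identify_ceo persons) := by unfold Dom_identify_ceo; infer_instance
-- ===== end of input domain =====

-- B replaces A's role-major nested scans (each role code rescanning all persons, plus a
-- fallback pass) by a single pass over persons tracking the best-priority named person.

-- ===== PORT A =====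
-- A's f-string f"{role} {role_text}".upper()
def pvRoleA (person : List (String × String)) : String :=
  PySem.Str.upper (PySem.Dict.getD ⟨person⟩ "role" "" ++ " " ++ PySem.Dict.getD ⟨person⟩ "role_text" "")

-- truthiness of person.get("name")
def pvNamedA (person : List (String × String)) : Bool :=
  match PySem.Dict.get? ⟨person⟩ "name" with
  | some s => s != ""
  | none => false

-- A's inner loop for one role_code: first person whose role contains it and who has a name
def pvFindRole (role_code : String) : List (List (String × String)) → Option String
  | [] => none
  | person :: rest =>
    if PySem.Str.isIn role_code (pvRoleA person) && pvNamedA person then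
      PySem.Dict.get? ⟨person⟩ "name"
    else pvFindRole role_code rest

-- A's fallback loop: first person with a name
def pvFallback : List (List (String × String)) → Option String
  | [] => none
  | person :: rest =>
    if pvNamedA person then PySem.Dict.get? ⟨person⟩ "name" else pvFallback rest

-- A's outer loop over ceo_roles, then the fallback
def pvOuter : List String → List (List (String × String)) → Option String
  | [], persons => pvFallback persons
  | role_code :: codes, persons =>
    match pvFindRole role_code persons with
    | some n => some n
    | none => pvOuter codes persons

def identify_ceo (persons : List (List (String × String))) : Option String :=
  pvOuter ["JUHL", "JUHATUSE LIIGE", "JUHATUSE ESIMEES", "JUHATAJA", "DIREKTOR", "PROKURIST"] persons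

-- ===== PORT B =====
def pvAltRoles : List String :=
  ["JUHL", "JUHATUSE LIIGE", "JUHATUSE ESIMEES", "JUHATAJA", "DIREKTOR", "PROKURIST"]

-- Source B's priority = next((i for i, rc in enumerate(ceo_roles) if rc in role), len(ceo_roles))
def pvPriority (role : String) : Nat :=
  pvAltRoles.findIdx (fun rc => PySem.Str.isIn rc role)

-- Source B's single pass, state = (best_priority, best_name)
def pvLoop : List (List (String × String)) → Nat → Option String → Option String
  | [], _, best_name => best_name
  | person :: rest, best_priority, best_name =>
    match PySem.Dict.get? ⟨person⟩ "name" with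
    | none => pvLoop rest best_priority best_name
    | some nm =>
      if nm == "" then pvLoop rest best_priority best_name
      else
        let role := PySem.Str.upper (PySem.Dict.getD ⟨person⟩ "role" "" ++ " " ++ PySem.Dict.getD ⟨person⟩ "role_text" "")
        let priority := pvPriority role
        if priority < best_priority then pvLoop rest priority (some nm)
        else pvLoop rest best_priority best_name

def identify_ceo_alt (persons : List (List (String × String))) : Option String :=
  pvLoop persons (pvAltRoles.length + 1) none

-- ===== PRECONDITION & SPEC =====
def Spec_identify_ceo (persons : List (List (String × String))) (out : Option String) : Prop := out = identify_ceo_alt persons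
instance (persons : List (List (String × String))) (out : Option String) : Decidable (Spec_identify_ceo persons out) := by unfold Spec_identify_ceo; infer_instance

-- ===== CLAIM (what is proved, stated in full; the proofs are below) =====
def Claim_equal_identify_ceo : Prop := ∀ (persons : List (List (String × String))), Dom_identify_ceo persons → Spec_identify_ceo persons (identify_ceo persons)

-- ===== LEMMAS AND PROOFS =====

-- priority of a person w.r.t. a generic role list
def pvPrioL (rs : List String) (person : List (String × String)) : Nat :=
  rs.findIdx (fun rc => PySem.Str.isIn rc (pvRoleA person))

-- minimal priority among named persons, sentinel rs.length + 1
def pvMin (rs : List String) (persons : List (List (String × String))) : Nat :=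
  ((persons.filter pvNamedA).map (pvPrioL rs)).foldr min (rs.length + 1)

def pvName? (person : List (String × String)) : Option String :=
  PySem.Dict.get? ⟨person⟩ "name"

-- the common specification: name of the first named person attaining the minimal priority
def pvSpecF (rs : List String) (persons : List (List (String × String))) : Option String :=
  ((persons.filter pvNamedA).find? (fun p => pvPrioL rs p == pvMin rs persons)).bind pvName?

theorem pv_find?_congr_mem {α : Type} (l : List α) (p q : α → Bool)
    (h : ∀ x ∈ l, p x = q x) : l.find? p = l.find? q := by
  induction l with
  | nil => rfl
  | cons a t ih =>
    simp only [List.find?_cons, h a (by simp)]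
    cases q a with
    | true => rfl
    | false => exact ih (fun x hx => h x (by simp [hx]))

theorem pv_foldr_min_le_init (l : List Nat) (b : Nat) : l.foldr min b ≤ b := by
  induction l with
  | nil => simp
  | cons a t ih => exact le_trans (min_le_right _ _) ih

theorem pv_foldr_min_le_of_mem {x : Nat} {l : List Nat} (b : Nat) (h : x ∈ l) :
    l.foldr min b ≤ x := by
  induction l with
  | nil => cases h
  | cons a t ih =>
    rcases List.mem_cons.mp h with rfl | h'
    · exact min_le_left _ _
    · exact le_trans (min_le_right _ _) (ih h')

theorem pv_foldr_min_init (l : List Nat) (a b : Nat) :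
    l.foldr min (min a b) = min (l.foldr min a) b := by
  induction l with
  | nil => rfl
  | cons c t ih => simp [ih, Nat.min_assoc]

theorem pv_foldr_min_map_succ (l : List Nat) (b : Nat) :
    (l.map (· + 1)).foldr min (b + 1) = l.foldr min b + 1 := by
  induction l with
  | nil => rfl
  | cons a t ih => simp [ih, Nat.succ_min_succ]

theorem pv_foldr_min_eq_zero_of_mem {l : List Nat} (b : Nat) (h : 0 ∈ l) :
    l.foldr min b = 0 := Nat.le_zero.mp (pv_foldr_min_le_of_mem b h)

theorem pv_named_name {p : List (String × String)} (h : pvNamedA p = true) :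
    ∃ s, pvName? p = some s := by
  unfold pvNamedA at h
  unfold pvName?
  cases hg : PySem.Dict.get? ⟨p⟩ "name" with
  | none => rw [hg] at h; exact absurd h (by simp)
  | some s => exact ⟨s, rfl⟩

-- A's fallback is the first named person's name
theorem pv_fallback_eq (persons : List (List (String × String))) :
    pvFallback persons = (persons.filter pvNamedA).head?.bind pvName? := by
  induction persons with
  | nil => rfl
  | cons p ps ih =>
    by_cases h : pvNamedA p = true
    · rw [List.filter_cons_of_pos h]
      simp only [pvFallback, if_pos h]
      rfl
    · simp only [Bool.not_eq_true] at h
      rw [List.filter_cons_of_neg (by simp [h])]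
      simp only [pvFallback, h]
      simpa using ih

-- A's inner loop as find? over the named persons
theorem pv_findRole_eq (rc : String) (persons : List (List (String × String))) :
    pvFindRole rc persons =
      ((persons.filter pvNamedA).find? (fun p => PySem.Str.isIn rc (pvRoleA p))).bind pvName? := by
  induction persons with
  | nil => rfl
  | cons p ps ih =>
    by_cases hn : pvNamedA p = true
    · rw [List.filter_cons_of_pos hn]
      by_cases hi : PySem.Str.isIn rc (pvRoleA p) = true
      · rw [List.find?_cons_of_pos (p := fun q => PySem.Str.isIn rc (pvRoleA q)) hi,
            pvFindRole,
            if_pos (show (PySem.Str.isIn rc (pvRoleA p) && pvNamedA p) = true by rw [hi, hn]; rfl)]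
        rfl
      · rw [List.find?_cons_of_neg (p := fun q => PySem.Str.isIn rc (pvRoleA q)) (by simpa using hi)]
        rw [pvFindRole, if_neg (show ¬ (PySem.Str.isIn rc (pvRoleA p) && pvNamedA p) = true from
          fun hc => hi (Bool.and_elim_left hc))]
        exact ih
    · simp only [Bool.not_eq_true] at hn
      rw [List.filter_cons_of_neg (by simp [hn])]
      rw [pvFindRole, if_neg (show ¬ (PySem.Str.isIn rc (pvRoleA p) && pvNamedA p) = true from
          fun hc => by rw [Bool.and_elim_right hc] at hn; cases hn)]
      exact ih

theorem pv_prioL_nil (p : List (String × String)) : pvPrioL [] p = 0 := rfl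

theorem pv_prioL_cons (r : String) (rs : List String) (p : List (String × String)) :
    pvPrioL (r :: rs) p =
      if PySem.Str.isIn r (pvRoleA p) then 0 else pvPrioL rs p + 1 := by
  simp [pvPrioL, List.findIdx_cons]

theorem pv_prioL_le (rs : List String) (p : List (String × String)) :
    pvPrioL rs p ≤ rs.length := List.findIdx_le_length

-- characterisation of A's nested loops
theorem pv_outer_eq (rs : List String) (persons : List (List (String × String))) :
    pvOuter rs persons = pvSpecF rs persons := by
  induction rs with
  | nil =>
    rw [pvOuter, pv_fallback_eq, pvSpecF]
    cases hf : persons.filter pvNamedA with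
    | nil => rfl
    | cons q qs =>
      have hmin : pvMin [] persons = 0 := by
        rw [pvMin, hf]
        exact pv_foldr_min_eq_zero_of_mem _ (by simp [pv_prioL_nil])
      rw [hmin]
      rw [List.find?_cons_of_pos (by simp [pv_prioL_nil])]
      rfl
  | cons r rs ih =>
    rw [pvOuter, pv_findRole_eq]
    cases hfind : (persons.filter pvNamedA).find? (fun p => PySem.Str.isIn r (pvRoleA p)) with
    | some p₀ =>
      -- some named person matches r: minimal priority is 0, first match wins
      have hp₀ : PySem.Str.isIn r (pvRoleA p₀) = true := by
        have := List.find?_some hfind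
        simpa using this
      have hmem : p₀ ∈ persons.filter pvNamedA := List.mem_of_find?_eq_some hfind
      have hnmd : pvNamedA p₀ = true := List.of_mem_filter hmem
      have hmin : pvMin (r :: rs) persons = 0 := by
        apply pv_foldr_min_eq_zero_of_mem
        refine List.mem_map.mpr ⟨p₀, hmem, ?_⟩
        rw [pv_prioL_cons, if_pos hp₀]
      rw [pvSpecF, hmin]
      have hpred : ∀ p ∈ persons.filter pvNamedA,
          (pvPrioL (r :: rs) p == 0) = PySem.Str.isIn r (pvRoleA p) := by
        intro p _
        rw [pv_prioL_cons]
        cases h : PySem.Str.isIn r (pvRoleA p) <;> simp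
      rw [pv_find?_congr_mem _ _ _ hpred, hfind]
      obtain ⟨s, hs⟩ := pv_named_name hnmd
      show (match pvName? p₀ with | some n => some n | none => pvOuter rs persons) = pvName? p₀
      rw [hs]
    | none =>
      -- nobody matches r: every priority shifts by one, the choice is unchanged
      have hno : ∀ p ∈ persons.filter pvNamedA, PySem.Str.isIn r (pvRoleA p) = false := by
        intro p hp
        cases h : PySem.Str.isIn r (pvRoleA p) with
        | false => rfl
        | true =>
          have := List.find?_eq_none.mp hfind p hp
          rw [h] at this
          exact absurd rfl this
      have hshift : ∀ p ∈ persons.filter pvNamedA,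
          pvPrioL (r :: rs) p = pvPrioL rs p + 1 := by
        intro p hp
        rw [pv_prioL_cons, if_neg (by simpa using hno p hp)]
      have hmap : (persons.filter pvNamedA).map (pvPrioL (r :: rs)) =
          ((persons.filter pvNamedA).map (pvPrioL rs)).map (· + 1) := by
        rw [List.map_map]
        exact List.map_congr_left (fun p hp => by simp [hshift p hp])
      have hmin : pvMin (r :: rs) persons = pvMin rs persons + 1 := by
        rw [pvMin, hmap]
        have h2 : (r :: rs).length + 1 = (rs.length + 1) + 1 := by simp
        rw [h2, pv_foldr_min_map_succ]
        rfl
      have hpred : ∀ p ∈ persons.filter pvNamedA,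
          (pvPrioL rs p == pvMin rs persons) = (pvPrioL (r :: rs) p == pvMin rs persons + 1) := by
        intro p hp
        rw [hshift p hp]
        simp
      show pvOuter rs persons = pvSpecF (r :: rs) persons
      rw [ih, pvSpecF, pvSpecF, hmin, pv_find?_congr_mem _ _ _ hpred]

-- running minimum of B's loop over a prefix, initial value bp
def pvMinB (persons : List (List (String × String))) (bp : Nat) : Nat :=
  ((persons.filter pvNamedA).map (pvPrioL pvAltRoles)).foldr min bp

-- characterisation of B's single pass
theorem pv_loop_eq (persons : List (List (String × String))) (bp : Nat) (bn : Option String) :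
    pvLoop persons bp bn =
      if pvMinB persons bp < bp then
        ((persons.filter pvNamedA).find? (fun p => pvPrioL pvAltRoles p == pvMinB persons bp)).bind pvName?
      else bn := by
  induction persons generalizing bp bn with
  | nil => simp [pvLoop, pvMinB]
  | cons p ps ih =>
    have hMle : pvMinB ps bp ≤ bp := pv_foldr_min_le_init _ _
    cases hname : PySem.Dict.get? ⟨p⟩ "name" with
    | none =>
      have hn : pvNamedA p = false := by simp [pvNamedA, hname]
      have hfil : (p :: ps).filter pvNamedA = ps.filter pvNamedA := by
        rw [List.filter_cons_of_neg (by simp [hn])]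
      simp only [pvLoop, hname]
      rw [ih]
      simp only [pvMinB, hfil]
    | some nm =>
      by_cases hnm : nm = ""
      · have hn : pvNamedA p = false := by simp [pvNamedA, hname, hnm]
        have hfil : (p :: ps).filter pvNamedA = ps.filter pvNamedA := by
          rw [List.filter_cons_of_neg (by simp [hn])]
        subst hnm
        simp only [pvLoop, hname]
        rw [if_pos (show (("" : String) == "") = true from by decide), ih]
        simp only [pvMinB, hfil]
      · have hn : pvNamedA p = true := by simp [pvNamedA, hname, hnm]
        have hfil : (p :: ps).filter pvNamedA = p :: ps.filter pvNamedA :=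
          List.filter_cons_of_pos hn
        have hnm2 : (nm == "") = false := by simpa using hnm
        have hMcons : pvMinB (p :: ps) bp = min (pvPrioL pvAltRoles p) (pvMinB ps bp) := by
          simp [pvMinB, hfil]
        have hqdef : pvPriority (PySem.Str.upper (PySem.Dict.getD ⟨p⟩ "role" "" ++ " " ++ PySem.Dict.getD ⟨p⟩ "role_text" "")) = pvPrioL pvAltRoles p := rfl
        have hpn : pvName? p = some nm := hname
        simp only [pvLoop, hname]
        rw [if_neg (by simp [hnm]), hqdef]
        by_cases hlt : pvPrioL pvAltRoles p < bp
        · rw [if_pos hlt, ih]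
          have hMq : pvMinB ps (pvPrioL pvAltRoles p)
              = min (pvMinB ps bp) (pvPrioL pvAltRoles p) := by
            have h1 : min bp (pvPrioL pvAltRoles p) = pvPrioL pvAltRoles p :=
              Nat.min_eq_right (Nat.le_of_lt hlt)
            calc pvMinB ps (pvPrioL pvAltRoles p)
                = ((ps.filter pvNamedA).map (pvPrioL pvAltRoles)).foldr min
                    (min bp (pvPrioL pvAltRoles p)) := by rw [h1]; rfl
              _ = min (pvMinB ps bp) (pvPrioL pvAltRoles p) := pv_foldr_min_init _ _ _
          by_cases hM : pvMinB ps bp < pvPrioL pvAltRoles p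
          · -- an earlier person in ps is strictly better: p is skipped
            have hmq : pvMinB ps (pvPrioL pvAltRoles p) = pvMinB ps bp := by
              rw [hMq]; exact Nat.min_eq_left (Nat.le_of_lt hM)
            have hc : pvMinB (p :: ps) bp = pvMinB ps bp := by
              rw [hMcons]; exact Nat.min_eq_right (Nat.le_of_lt hM)
            rw [hmq, if_pos hM, hc, if_pos (lt_trans hM hlt), hfil]
            rw [List.find?_cons_of_neg (by simp; omega)]
          · -- p is at least as good as everything in ps: p wins
            have hge : pvPrioL pvAltRoles p ≤ pvMinB ps bp := Nat.le_of_not_lt hM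
            have hmq : pvMinB ps (pvPrioL pvAltRoles p) = pvPrioL pvAltRoles p := by
              rw [hMq]; exact Nat.min_eq_right hge
            have hc : pvMinB (p :: ps) bp = pvPrioL pvAltRoles p := by
              rw [hMcons]; exact Nat.min_eq_left hge
            rw [hmq, if_neg (lt_irrefl _), hc, if_pos hlt, hfil]
            rw [List.find?_cons_of_pos (by simp)]
            exact hpn.symm
        · -- p's priority does not beat the current best
          rw [if_neg hlt, ih]
          have hble : bp ≤ pvPrioL pvAltRoles p := Nat.le_of_not_lt hlt
          have hc : pvMinB (p :: ps) bp = pvMinB ps bp := by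
            rw [hMcons]; exact Nat.min_eq_right (le_trans hMle hble)
          rw [hc, hfil]
          by_cases hM : pvMinB ps bp < bp
          · rw [if_pos hM, if_pos hM]
            rw [List.find?_cons_of_neg (by simp; omega)]
          · rw [if_neg hM, if_neg hM]

-- ===== VERDICT (by name: the statement is the Claim_ definition above) =====
theorem identify_ceo_spec : Claim_equal_identify_ceo := by
  intro persons _
  unfold Spec_identify_ceo
  rw [identify_ceo,
      show pvOuter ["JUHL", "JUHATUSE LIIGE", "JUHATUSE ESIMEES", "JUHATAJA", "DIREKTOR", "PROKURIST"] persons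
        = pvOuter pvAltRoles persons from rfl,
      pv_outer_eq, identify_ceo_alt, pv_loop_eq]
  have hmm : pvMinB persons (pvAltRoles.length + 1) = pvMin pvAltRoles persons := rfl
  rw [hmm]
  cases hf : persons.filter pvNamedA with
  | nil =>
    rw [if_neg]
    · rw [pvSpecF, hf]; rfl
    · rw [pvMin, hf]; simp
  | cons r0 rest =>
    rw [if_pos]
    · rw [pvSpecF, hf]
    · have h1 : pvMin pvAltRoles persons ≤ pvPrioL pvAltRoles r0 := by
        apply pv_foldr_min_le_of_mem
        rw [hf]; simp
      have h6 := pv_prioL_le pvAltRoles r0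
      have h7 : pvAltRoles.length = 6 := rfl
      omega
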